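-- pv_equiv track=rewrite | github.com/ooyejinn/algorithm | 프로그래머스/1/42862. 체육복/체육복.py | solution
-- ===== SOURCE A (Python) =====
-- def solution(n, lost, reserve):
--
--     set_reserve = set(reserve) - set(lost)
--     set_lost = set(lost) - set(reserve)
--
--     sorted_lost = sorted(list(set_lost))
--
--     for l in sorted_lost:
--         if l - 1 in set_reserve:  # 앞 번호
--             set_reserve.remove(l - 1)
--         elif l + 1 in set_reserve:  # 뒷 번호
--             set_reserve.remove(l + 1)
--         else:
--             n -= 1
--
--     return n
-- ===== SOURCE B (Python) =====
-- def solution(n, lost, reserve):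
--     # Two-pointer greedy over the two sorted net sets (instead of A's
--     # membership tests against a shrinking reserve set).
--     L = sorted(set(lost) - set(reserve))
--     R = sorted(set(reserve) - set(lost))
--     j = 0
--     unmatched = 0
--     for l in L:
--         while j < len(R) and R[j] < l - 1:
--             j += 1
--         if j < len(R) and R[j] <= l + 1:
--             j += 1
--         else:
--             unmatched += 1
--     return n - unmatched
-- ===== Notes on version B (the rewrite author's own statement) =====
-- stated objective: alternative
-- what changed: Replaces A's per-lost set membership/remove against a mutable reserve set by sorting both net sets once and matching them with a single two-pointer sweep that counts the unmatched students.
import Mathlib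
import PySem

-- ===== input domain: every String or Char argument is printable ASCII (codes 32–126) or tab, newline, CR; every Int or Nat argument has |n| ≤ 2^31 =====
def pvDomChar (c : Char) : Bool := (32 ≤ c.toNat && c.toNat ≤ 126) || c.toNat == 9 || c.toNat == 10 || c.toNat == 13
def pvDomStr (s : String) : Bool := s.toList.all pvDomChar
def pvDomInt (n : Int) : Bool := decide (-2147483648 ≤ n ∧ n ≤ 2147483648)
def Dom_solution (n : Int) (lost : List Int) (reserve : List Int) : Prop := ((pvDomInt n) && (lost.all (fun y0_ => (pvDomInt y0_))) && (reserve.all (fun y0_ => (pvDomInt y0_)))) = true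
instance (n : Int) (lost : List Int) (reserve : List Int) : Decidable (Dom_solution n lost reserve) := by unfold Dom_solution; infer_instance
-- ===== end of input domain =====

-- B replaces A's shrinking-reserve-set greedy by a two-pointer sweep over both sorted net sets (alternative decomposition, similar cost).


-- ===== PORT A =====
-- loop body of A's 'for l in sorted_lost' (state = (set_reserve, n)).
-- Python's set.remove is called only under the membership guard, so it equals Set.discard here (no KeyError possible).
def solStepA (st : PySem.Set Int × Int) (l : Int) : PySem.Set Int × Int :=
  if PySem.Set.contains st.1 (l - 1) then (PySem.Set.discard st.1 (l - 1), st.2)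
  else if PySem.Set.contains st.1 (l + 1) then (PySem.Set.discard st.1 (l + 1), st.2)
  else (st.1, st.2 - 1)

def solution (n : Int) (lost : List Int) (reserve : List Int) : Int :=
  let setReserve : PySem.Set Int := PySem.Set.diff (PySem.Set.ofList reserve) (PySem.Set.ofList lost)
  let setLost : PySem.Set Int := PySem.Set.diff (PySem.Set.ofList lost) (PySem.Set.ofList reserve)
  let sortedLost := PySem.List.sorted setLost (fun x => x) false
  (sortedLost.foldl solStepA (setReserve, n)).2

-- ===== PORT B =====
-- 'while j < len(R) and R[j] < l - 1: j += 1'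
def solSkipIdx (R : List Int) (l : Int) (j : Nat) : Nat :=
  if h : j < R.length then
    if R[j] < l - 1 then solSkipIdx R l (j + 1) else j
  else j
termination_by R.length - j

-- loop body of B's 'for l in L' (state = (j, unmatched))
def solStepBIdx (R : List Int) (st : Nat × Int) (l : Int) : Nat × Int :=
  let j := solSkipIdx R l st.1
  if h : j < R.length then
    if R[j] ≤ l + 1 then (j + 1, st.2) else (j, st.2 + 1)
  else (j, st.2 + 1)

def solution_alt (n : Int) (lost : List Int) (reserve : List Int) : Int :=
  let L := PySem.List.sorted (PySem.Set.diff (PySem.Set.ofList lost) (PySem.Set.ofList reserve)) (fun x => x) false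
  let R := PySem.List.sorted (PySem.Set.diff (PySem.Set.ofList reserve) (PySem.Set.ofList lost)) (fun x => x) false
  n - (L.foldl (solStepBIdx R) (0, 0)).2

-- ===== PRECONDITION & SPEC =====
def Spec_solution (n : Int) (lost : List Int) (reserve : List Int) (out : Int) : Prop := out = solution_alt n lost reserve
instance (n : Int) (lost : List Int) (reserve : List Int) (out : Int) : Decidable (Spec_solution n lost reserve out) := by unfold Spec_solution; infer_instance

-- ===== CLAIM (what is proved, stated in full; the proofs are below) =====
def Claim_equal_solution : Prop := ∀ (n : Int) (lost : List Int) (reserve : List Int), Dom_solution n lost reserve → Spec_solution n lost reserve (solution n lost reserve)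

-- ===== LEMMAS AND PROOFS =====

-- proof-side list-cursor rephrasing of B's loop: consuming the front of R.drop j
def solSkip (l : Int) : List Int → List Int
  | [] => []
  | r :: rest => if r < l - 1 then solSkip l rest else r :: rest

def solStepB (st : List Int × Int) (l : Int) : List Int × Int :=
  match solSkip l st.1 with
  | [] => ([], st.2 + 1)
  | r :: rest => if r ≤ l + 1 then (rest, st.2) else (r :: rest, st.2 + 1)

lemma solSkipIdx_drop (R : List Int) (l : Int) (j : Nat) :
    R.drop (solSkipIdx R l j) = solSkip l (R.drop j) := by
  fun_induction solSkipIdx R l j with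
  | case1 j h hlt ih =>
    rw [List.drop_eq_getElem_cons h]
    simp only [solSkip, if_pos hlt]
    exact ih
  | case2 j h hlt =>
    rw [List.drop_eq_getElem_cons h]
    simp only [solSkip, if_neg hlt]
  | case3 j h =>
    have hnil : R.drop j = [] := List.drop_eq_nil_iff.mpr (by omega)
    simp [hnil, solSkip]

lemma foldB_bridge : ∀ (L : List Int) (j : Nat) (u : Int) (R : List Int),
    (L.foldl (solStepBIdx R) (j, u)).2 = (L.foldl solStepB (R.drop j, u)).2 := by
  intro L
  induction L with
  | nil => intro j u R; rfl
  | cons l L' ih =>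
    intro j u R
    rw [List.foldl_cons, List.foldl_cons]
    have hdrop := solSkipIdx_drop R l j
    by_cases h : solSkipIdx R l j < R.length
    · have hcons : R.drop (solSkipIdx R l j) = R[solSkipIdx R l j] :: R.drop (solSkipIdx R l j + 1) :=
        List.drop_eq_getElem_cons h
      by_cases hle : R[solSkipIdx R l j] ≤ l + 1
      · have h1 : solStepBIdx R (j, u) l = (solSkipIdx R l j + 1, u) := by
          simp only [solStepBIdx]
          rw [dif_pos h, if_pos hle]
      
        have h2 : solStepB (R.drop j, u) l = (R.drop (solSkipIdx R l j + 1), u) := by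
          simp only [solStepB]
          rw [← hdrop, hcons]
          change (if R[solSkipIdx R l j] ≤ l + 1 then _ else _) = _
          rw [if_pos hle]
        rw [h1, h2]
        exact ih _ u R
      · have h1 : solStepBIdx R (j, u) l = (solSkipIdx R l j, u + 1) := by
          simp only [solStepBIdx]
          rw [dif_pos h, if_neg hle]
        have h2 : solStepB (R.drop j, u) l = (R.drop (solSkipIdx R l j), u + 1) := by
          simp only [solStepB]
          rw [← hdrop, hcons]
          change (if R[solSkipIdx R l j] ≤ l + 1 then _ else _) = _
          rw [if_neg hle, ← hcons]
        rw [h1, h2]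
        exact ih _ (u + 1) R
    · have hnil : R.drop (solSkipIdx R l j) = [] := List.drop_eq_nil_iff.mpr (by omega)
      have h1 : solStepBIdx R (j, u) l = (solSkipIdx R l j, u + 1) := by
        simp only [solStepBIdx]
        rw [dif_neg h]
      have h2 : solStepB (R.drop j, u) l = (R.drop (solSkipIdx R l j), u + 1) := by
        simp only [solStepB]
        rw [← hdrop, hnil]
      rw [h1, h2]
      exact ih _ (u + 1) R


lemma solSkip_suffix (l : Int) (R : List Int) : solSkip l R <:+ R := by
  induction R with
  | nil => simp [solSkip]
  | cons r rest ih =>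
    simp only [solSkip]
    split_ifs with h
    · exact ih.trans (List.suffix_cons r rest)
    · exact List.suffix_refl _

lemma solSkip_mem {l x : Int} {R : List Int} (h : x ∈ solSkip l R) : x ∈ R :=
  (solSkip_suffix l R).subset h

lemma mem_solSkip_of_ge {l x : Int} {R : List Int} (hx : x ∈ R) (hge : l - 1 ≤ x) :
    x ∈ solSkip l R := by
  induction R with
  | nil => simp at hx
  | cons r rest ih =>
    simp only [solSkip]
    split_ifs with h
    · rcases List.mem_cons.mp hx with rfl | hx'
      · omega
      · exact ih hx'
    · exact hx

lemma solSkip_dropped {l x : Int} {R : List Int} (hx : x ∈ R) (hnx : x ∉ solSkip l R) :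
    x < l - 1 := by
  by_contra h
  exact hnx (mem_solSkip_of_ge hx (by omega))

lemma solSkip_head_ge {l r : Int} {rest R : List Int} (h : solSkip l R = r :: rest) :
    l - 1 ≤ r := by
  induction R with
  | nil => simp [solSkip] at h
  | cons a t ih =>
    simp only [solSkip] at h
    split_ifs at h with ha
    · exact ih h
    · cases h
      omega

lemma head_le_of_mem {r x : Int} {rest : List Int}
    (hp : (r :: rest).Pairwise (· < ·)) (hx : x ∈ r :: rest) : r ≤ x := by
  rcases List.mem_cons.mp hx with rfl | hx'
  · exact le_refl _
  · exact le_of_lt ((List.pairwise_cons.mp hp).1 x hx')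

lemma pairwise_lt_of_nodup_le {R : List Int}
    (hle : R.Pairwise (· ≤ ·)) (hnd : R.Nodup) : R.Pairwise (· < ·) :=
  (hle.and hnd).imp (fun h => lt_of_le_of_ne h.1 h.2)

lemma sorted_pairwise_lt (xs : List Int) (hnd : xs.Nodup) :
    (PySem.List.sorted xs (fun x => x) false).Pairwise (· < ·) := by
  apply pairwise_lt_of_nodup_le
  · exact PySem.List.sorted_pairwise xs (fun x => x)
  · exact ((PySem.List.sorted_perm xs (fun x => x) false).nodup_iff).mpr hnd

-- the loop invariant: A's fold over the reserve set S and B's fold over the sorted cursor R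
-- count the same number of unmatched students, provided R lists exactly the still-matchable part of S.
lemma sol_loop_eq : ∀ (L S R : List Int) (n u : Int),
    L.Pairwise (· < ·) → R.Pairwise (· < ·) →
    (∀ x ∈ R, x ∈ S) →
    (∀ x ∈ S, x ∉ R → ∀ l ∈ L, x < l - 1) →
    (∀ l ∈ L, l ∉ S) →
    (L.foldl solStepA (S, n)).2 = n + u - (L.foldl solStepB (R, u)).2 := by
  intro L
  induction L with
  | nil =>
    intro S R n u _ _ _ _ _
    simp
  | cons l L' ih =>
    intro S R n u hL hR hsub hjunk hdisj
    have hLl := (List.pairwise_cons.mp hL).1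
    have hL' := (List.pairwise_cons.mp hL).2
    have hlS : l ∉ S := hdisj l (by simp)
    have hR' : (solSkip l R).Pairwise (· < ·) :=
      hR.sublist (solSkip_suffix l R).sublist
    rw [List.foldl_cons, List.foldl_cons]
    by_cases h1 : (l - 1) ∈ S
    · -- A removes l-1; B's cursor head is exactly l-1
      have hc1 : PySem.Set.contains S (l - 1) = true := (PySem.Set.contains_iff S (l - 1)).mpr h1
      have h1R : (l - 1) ∈ R := by
        by_contra hn
        have := hjunk (l - 1) h1 hn l (by simp)
        omega
      have h1R' : (l - 1) ∈ solSkip l R := mem_solSkip_of_ge h1R (by omega)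
      obtain ⟨r, rest, hskip⟩ : ∃ r rest, solSkip l R = r :: rest := by
        cases hh : solSkip l R with
        | nil => rw [hh] at h1R'; simp at h1R'
        | cons a b => exact ⟨a, b, rfl⟩
      have hr1 : r = l - 1 := by
        have hge := solSkip_head_ge hskip
        have hle : r ≤ l - 1 := head_le_of_mem (hskip ▸ hR') (hskip ▸ h1R')
        omega
      have hA : solStepA (S, n) l = (PySem.Set.discard S (l - 1), n) := by
        simp only [solStepA]
        rw [if_pos hc1]
      have hB : solStepB (R, u) l = (rest, u) := by
        simp only [solStepB, hskip]
        rw [if_pos (by omega : r ≤ l + 1)]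
      rw [hA, hB]
      apply ih _ _ n u hL' (List.pairwise_cons.mp (hskip ▸ hR')).2
      · intro x hx
        have hxR' : x ∈ solSkip l R := hskip ▸ List.mem_cons_of_mem r hx
        have hxS := hsub x (solSkip_mem hxR')
        have hxne : x ≠ l - 1 := by
          have := (List.pairwise_cons.mp (hskip ▸ hR')).1 x hx
          omega
        exact (PySem.Set.mem_discard S (l - 1) x).mpr ⟨hxS, hxne⟩
      · intro x hxS' hxrest l' hl'
        have hxd := (PySem.Set.mem_discard S (l - 1) x).mp hxS'
        have hll' : l < l' := hLl l' hl'
        by_cases hxR : x ∈ R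
        · by_cases hxR' : x ∈ solSkip l R
          · rw [hskip] at hxR'
            rcases List.mem_cons.mp hxR' with rfl | hx
            · omega
            · exact absurd hx hxrest
          · have := solSkip_dropped hxR hxR'
            omega
        · exact hjunk x hxd.1 hxR l' (List.mem_cons_of_mem l hl')
      · intro l' hl' hmem
        exact hdisj l' (List.mem_cons_of_mem l hl') ((PySem.Set.mem_discard S (l - 1) l').mp hmem).1
    · have hc1 : ¬ (PySem.Set.contains S (l - 1) = true) :=
        fun hc => h1 ((PySem.Set.contains_iff S (l - 1)).mp hc)
      by_cases h2 : (l + 1) ∈ S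
      · -- A removes l+1; B's cursor head is exactly l+1
        have hc2 : PySem.Set.contains S (l + 1) = true := (PySem.Set.contains_iff S (l + 1)).mpr h2
        have h2R : (l + 1) ∈ R := by
          by_contra hn
          have := hjunk (l + 1) h2 hn l (by simp)
          omega
        have h2R' : (l + 1) ∈ solSkip l R := mem_solSkip_of_ge h2R (by omega)
        obtain ⟨r, rest, hskip⟩ : ∃ r rest, solSkip l R = r :: rest := by
          cases hh : solSkip l R with
          | nil => rw [hh] at h2R'; simp at h2R'
          | cons a b => exact ⟨a, b, rfl⟩
        have hrS : r ∈ S := hsub r (solSkip_mem (hskip ▸ List.mem_cons_self))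
        have hr2 : r = l + 1 := by
          have hge := solSkip_head_ge hskip
          have hle : r ≤ l + 1 := head_le_of_mem (hskip ▸ hR') (hskip ▸ h2R')
          have hne1 : r ≠ l - 1 := fun h => h1 (h ▸ hrS)
          have hnel : r ≠ l := fun h => hlS (h ▸ hrS)
          omega
        have hA : solStepA (S, n) l = (PySem.Set.discard S (l + 1), n) := by
          simp only [solStepA]
          rw [if_neg hc1, if_pos hc2]
        have hB : solStepB (R, u) l = (rest, u) := by
          simp only [solStepB, hskip]
          rw [if_pos (by omega : r ≤ l + 1)]
        rw [hA, hB]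
        apply ih _ _ n u hL' (List.pairwise_cons.mp (hskip ▸ hR')).2
        · intro x hx
          have hxR' : x ∈ solSkip l R := hskip ▸ List.mem_cons_of_mem r hx
          have hxS := hsub x (solSkip_mem hxR')
          have hxne : x ≠ l + 1 := by
            have := (List.pairwise_cons.mp (hskip ▸ hR')).1 x hx
            omega
          exact (PySem.Set.mem_discard S (l + 1) x).mpr ⟨hxS, hxne⟩
        · intro x hxS' hxrest l' hl'
          have hxd := (PySem.Set.mem_discard S (l + 1) x).mp hxS'
          have hll' : l < l' := hLl l' hl'
          by_cases hxR : x ∈ R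
          · by_cases hxR' : x ∈ solSkip l R
            · rw [hskip] at hxR'
              rcases List.mem_cons.mp hxR' with rfl | hx
              · omega
              · exact absurd hx hxrest
            · have := solSkip_dropped hxR hxR'
              omega
          · exact hjunk x hxd.1 hxR l' (List.mem_cons_of_mem l hl')
        · intro l' hl' hmem
          exact hdisj l' (List.mem_cons_of_mem l hl') ((PySem.Set.mem_discard S (l + 1) l').mp hmem).1
      · -- no uniform available: both count this student as unmatched
        have hc2 : ¬ (PySem.Set.contains S (l + 1) = true) :=
          fun hc => h2 ((PySem.Set.contains_iff S (l + 1)).mp hc)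
        have hA : solStepA (S, n) l = (S, n - 1) := by
          simp only [solStepA]
          rw [if_neg hc1, if_neg hc2]
        have hB : solStepB (R, u) l = (solSkip l R, u + 1) := by
          simp only [solStepB]
          cases hh : solSkip l R with
          | nil => rfl
          | cons r rest =>
            have hge := solSkip_head_ge hh
            have hrS : r ∈ S := hsub r (solSkip_mem (hh ▸ List.mem_cons_self))
            have hne1 : r ≠ l - 1 := fun h => h1 (h ▸ hrS)
            have hnel : r ≠ l := fun h => hlS (h ▸ hrS)
            have hne2 : r ≠ l + 1 := fun h => h2 (h ▸ hrS)
            change (if r ≤ l + 1 then (rest, u) else (r :: rest, u + 1)) = (r :: rest, u + 1)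
            rw [if_neg (by omega : ¬ r ≤ l + 1)]
        rw [hA, hB]
        have heq := ih S (solSkip l R) (n - 1) (u + 1) hL' hR'
          (fun x hx => hsub x (solSkip_mem hx))
          (fun x hxS hxR' l' hl' => by
            have hll' : l < l' := hLl l' hl'
            by_cases hxR : x ∈ R
            · have := solSkip_dropped hxR hxR'
              omega
            · exact hjunk x hxS hxR l' (List.mem_cons_of_mem l hl'))
          (fun l' hl' => hdisj l' (List.mem_cons_of_mem l hl'))
        rw [heq]
        ring

-- ===== VERDICT (by name: the statement is the Claim_ definition above) =====
theorem solution_spec : Claim_equal_solution := by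
  intro n lost reserve _
  unfold Spec_solution solution solution_alt
  set S : PySem.Set Int := PySem.Set.diff (PySem.Set.ofList reserve) (PySem.Set.ofList lost) with hSdef
  set LS : PySem.Set Int := PySem.Set.diff (PySem.Set.ofList lost) (PySem.Set.ofList reserve) with hLSdef
  set L := PySem.List.sorted LS (fun x => x) false with hLdef
  set R := PySem.List.sorted S (fun x => x) false with hRdef
  have hndS : S.Nodup := PySem.Set.nodup_diff _ _ (PySem.Set.nodup_ofList reserve)
  have hndLS : LS.Nodup := PySem.Set.nodup_diff _ _ (PySem.Set.nodup_ofList lost)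
  have hL : L.Pairwise (· < ·) := sorted_pairwise_lt LS hndLS
  have hR : R.Pairwise (· < ·) := sorted_pairwise_lt S hndS
  have hmemR : ∀ x : Int, x ∈ R ↔ x ∈ S := fun x => PySem.List.mem_sorted S (fun y => y) false x
  have h := sol_loop_eq L S R n 0 hL hR
    (fun x hx => (hmemR x).mp hx)
    (fun x hxS hxR _ _ => absurd ((hmemR x).mpr hxS) hxR)
    (fun l hl => by
      have hlLS : l ∈ LS := (PySem.List.mem_sorted LS (fun y => y) false l).mp hl
      have hlost : l ∈ PySem.Set.ofList lost :=
        ((PySem.Set.mem_diff (PySem.Set.ofList lost) (PySem.Set.ofList reserve) l).mp hlLS).1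
      intro hlSmem
      exact ((PySem.Set.mem_diff (PySem.Set.ofList reserve) (PySem.Set.ofList lost) l).mp hlSmem).2 hlost)
  have hb := foldB_bridge L 0 0 R
  rw [List.drop_zero] at hb
  rw [h]
  show n + 0 - (List.foldl solStepB (R, 0) L).2 = n - (List.foldl (solStepBIdx R) (0, 0) L).2
  rw [hb]
  ring
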